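-- pv_equiv track=rewrite | github.com/dhwrwm100x/Week-1 | count.py | count
-- ===== SOURCE A (Python) =====
-- def count(a):
--     total1=0
--     total2=0
--     for i in a:
--         if i<0:
--             total1 +=1
--         else :
--             total2 +=1
--     return total1,total2
-- ===== SOURCE B (Python) =====
-- def count(a):
--     s = sorted(a)
--     lo, hi = 0, len(s)
--     while lo < hi:
--         mid = (lo + hi) // 2
--         if s[mid] < 0:
--             lo = mid + 1
--         else:
--             hi = mid
--     return lo, len(s) - lo
-- ===== Notes on version B (the rewrite author's own statement) =====
-- stated objective: alternative
-- what changed: B sorts the list and binary-searches (hand-written bisect_left) for the first non-negative element, so the negative count is the boundary index and the non-negative count is len minus it, instead of A's single pass with two conditional counters.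
import Mathlib
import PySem

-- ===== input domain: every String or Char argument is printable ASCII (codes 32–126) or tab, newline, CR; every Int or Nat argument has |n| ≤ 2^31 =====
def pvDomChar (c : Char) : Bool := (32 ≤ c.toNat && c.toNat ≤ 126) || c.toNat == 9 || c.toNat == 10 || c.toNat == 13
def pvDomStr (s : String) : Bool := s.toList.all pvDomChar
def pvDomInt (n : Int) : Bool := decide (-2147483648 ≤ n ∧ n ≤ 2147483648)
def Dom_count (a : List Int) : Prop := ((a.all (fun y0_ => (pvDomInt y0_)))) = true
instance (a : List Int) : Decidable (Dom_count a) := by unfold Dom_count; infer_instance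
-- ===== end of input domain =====

-- B sorts the list and binary-searches for the first non-negative element; same output everywhere.

-- ===== PORT A =====
-- for i in a: if i<0: total1+=1 else: total2+=1; return (total1,total2)
def count (a : List Int) : Int × Int :=
  a.foldl (fun (st : Int × Int) i =>
    if i < 0 then (st.1 + 1, st.2) else (st.1, st.2 + 1)) (0, 0)

-- ===== PORT B =====
-- while lo < hi: mid=(lo+hi)//2; if s[mid]<0: lo=mid+1 else: hi=mid
-- (fuel only makes the loop total; it is never exhausted since hi-lo shrinks each step)
def bsearchGo (s : List Int) : Nat → Int → Int → Int
  | 0, lo, _ => lo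
  | fuel+1, lo, hi =>
    if lo < hi then
      let mid := PySem.Int.floordiv (lo + hi) 2
      match PySem.List.pyGet? s mid with
      | some v => if v < 0 then bsearchGo s fuel (mid + 1) hi else bsearchGo s fuel lo mid
      | none => lo
    else lo

-- s = sorted(a); lo = first index with s[lo] >= 0 (binary search); return (lo, len(s)-lo)
def count_alt (a : List Int) : Int × Int :=
  let s := PySem.List.sorted a (fun x => x) false
  let lo := bsearchGo s s.length 0 (s.length : Int)
  (lo, (s.length : Int) - lo)

-- ===== PRECONDITION & SPEC =====
def Spec_count (a : List Int) (out : Int × Int) : Prop := out = count_alt a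
instance (a : List Int) (out : Int × Int) : Decidable (Spec_count a out) := by unfold Spec_count; infer_instance

-- ===== CLAIM (what is proved, stated in full; the proofs are below) =====
def Claim_equal_count : Prop := ∀ (a : List Int), Dom_count a → Spec_count a (count a)

-- ===== LEMMAS AND PROOFS =====

-- A's loop adds the negative / non-negative counts to the accumulator
theorem count_foldl_shift (a : List Int) (x y : Int) :
    a.foldl (fun (st : Int × Int) i =>
      if i < 0 then (st.1 + 1, st.2) else (st.1, st.2 + 1)) (x, y)
    = (x + (a.countP (fun i => decide (i < 0)) : Int),
       y + ((a.length : Int) - (a.countP (fun i => decide (i < 0)) : Int))) := by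
  induction a generalizing x y with
  | nil => simp
  | cons h t ih =>
    by_cases hh : h < 0 <;>
      simp [hh, ih] <;> omega

-- when the invariant pins every index: lo equals the number of negatives
theorem countP_of_split (s : List Int) (lo : Int) (h0 : 0 ≤ lo) (hle : lo ≤ (s.length : Int))
    (hneg : ∀ (i : Nat) (h : i < s.length), (i : Int) < lo → s[i] < 0)
    (hpos : ∀ (i : Nat) (h : i < s.length), lo ≤ (i : Int) → ¬ s[i] < 0) :
    ((s.countP (fun x => decide (x < 0)) : Nat) : Int) = lo := by
  have hk : lo.toNat ≤ s.length := by omega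
  have hsplit : s = s.take lo.toNat ++ s.drop lo.toNat := (List.take_append_drop _ s).symm
  have h1 : (s.take lo.toNat).countP (fun x => decide (x < 0)) = (s.take lo.toNat).length := by
    rw [List.countP_eq_length]
    intro x hx
    obtain ⟨i, hi, hxi⟩ := List.mem_iff_getElem.1 hx
    have hil : i < s.length := by
      have := hi; simp [List.length_take] at this; omega
    have : (s.take lo.toNat)[i] = s[i] := List.getElem_take
    subst hxi
    rw [this]
    simpa using hneg i hil (by have := hi; simp [List.length_take] at this; omega)
  have h2 : (s.drop lo.toNat).countP (fun x => decide (x < 0)) = 0 := by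
    rw [List.countP_eq_zero]
    intro x hx
    obtain ⟨i, hi, hxi⟩ := List.mem_iff_getElem.1 hx
    have hil : lo.toNat + i < s.length := by
      have := hi; simp [List.length_drop] at this; omega
    have hg : (s.drop lo.toNat)[i] = s[lo.toNat + i] := List.getElem_drop ..
    subst hxi
    rw [hg]
    simpa using hpos (lo.toNat + i) hil (by omega)
  calc ((s.countP (fun x => decide (x < 0)) : Nat) : Int)
      = (((s.take lo.toNat ++ s.drop lo.toNat).countP (fun x => decide (x < 0)) : Nat) : Int) := by
        rw [← hsplit]
    _ = lo := by
        rw [List.countP_append, h1, h2, List.length_take]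
        omega

theorem bsearchGo_correct (s : List Int) (hs : s.Pairwise (· ≤ ·)) :
    ∀ (fuel : Nat) (lo hi : Int), 0 ≤ lo → lo ≤ hi → hi ≤ (s.length : Int) →
    (hi - lo).toNat ≤ fuel →
    (∀ (i : Nat) (h : i < s.length), (i : Int) < lo → s[i] < 0) →
    (∀ (i : Nat) (h : i < s.length), hi ≤ (i : Int) → ¬ s[i] < 0) →
    bsearchGo s fuel lo hi = ((s.countP (fun x => decide (x < 0)) : Nat) : Int) := by
  intro fuel
  induction fuel with
  | zero =>
    intro lo hi h0 hlh hhl hfuel hneg hpos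
    have heq : lo = hi := by omega
    subst heq
    exact (countP_of_split s lo h0 (by omega) hneg (fun i h hi' => hpos i h hi')).symm
  | succ fuel ih =>
    intro lo hi h0 hlh hhl hfuel hneg hpos
    by_cases hlt : lo < hi
    · have hmid : PySem.Int.floordiv (lo + hi) 2 = (lo + hi) / 2 := by
        simp [PySem.Int.floordiv, Int.fdiv_eq_ediv]
      have hmlo : lo ≤ (lo + hi) / 2 := by omega
      have hmhi : (lo + hi) / 2 < hi := by omega
      have hmrange : ((lo + hi) / 2).toNat < s.length := by omega
      have hget : PySem.List.pyGet? s ((lo + hi) / 2) = some s[((lo + hi) / 2).toNat] :=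
        PySem.List.pyGet?_eq_some_getElem s (by omega) (by omega)
      have hmono : ∀ (i j : Nat) (hi' : i < s.length) (hj' : j < s.length),
          i ≤ j → s[i] ≤ s[j] := by
        intro i j hi' hj' hij
        rcases Nat.lt_or_eq_of_le hij with h | h
        · exact (List.pairwise_iff_getElem.1 hs) i j hi' hj' h
        · subst h; exact le_refl _
      simp only [bsearchGo, if_pos hlt, hmid, hget]
      by_cases hv : s[((lo + hi) / 2).toNat] < 0
      · rw [if_pos hv]
        apply ih ((lo + hi) / 2 + 1) hi (by omega) (by omega) hhl (by omega)
        · intro i h hi'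
          have : s[i] ≤ s[((lo + hi) / 2).toNat] := hmono i ((lo + hi) / 2).toNat h hmrange (by omega)
          omega
        · exact hpos
      · rw [if_neg hv]
        apply ih lo ((lo + hi) / 2) h0 (by omega) (by omega) (by omega) hneg
        intro i h hi'
        have : s[((lo + hi) / 2).toNat] ≤ s[i] := hmono ((lo + hi) / 2).toNat i hmrange h (by omega)
        omega
    · have heq : lo = hi := by omega
      simp only [bsearchGo, if_neg hlt]
      subst heq
      exact (countP_of_split s lo h0 (by omega) hneg (fun i h hi' => hpos i h hi')).symm

theorem count_alt_eq (a : List Int) :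
    count_alt a = ((a.countP (fun i => decide (i < 0)) : Int),
                   (a.length : Int) - (a.countP (fun i => decide (i < 0)) : Int)) := by
  have hperm : (PySem.List.sorted a (fun x => x) false).Perm a := PySem.List.sorted_perm ..
  have hcp : (PySem.List.sorted a (fun x => x) false).countP (fun x => decide (x < 0))
      = a.countP (fun i => decide (i < 0)) := hperm.countP_eq _
  have hlen : (PySem.List.sorted a (fun x => x) false).length = a.length := hperm.length_eq
  have hsorted : (PySem.List.sorted a (fun x => x) false).Pairwise (· ≤ ·) := by
    simpa using PySem.List.sorted_pairwise a (fun x => x)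
  have hb := bsearchGo_correct (PySem.List.sorted a (fun x => x) false) hsorted
      (PySem.List.sorted a (fun x => x) false).length 0
      ((PySem.List.sorted a (fun x => x) false).length : Int)
      (by omega) (by omega) (by omega) (by omega)
      (by intro i h hi'; omega)
      (by intro i h hi'; omega)
  rw [hlen, hcp] at hb
  simp only [count_alt, hlen, hb]

-- ===== VERDICT (by name: the statement is the Claim_ definition above) =====
theorem count_spec : Claim_equal_count := by
  intro a _
  show count a = count_alt a
  rw [count_alt_eq]
  have := count_foldl_shift a 0 0
  simp [count] at this ⊢
  rw [this]
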